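-- pv_equiv track=rewrite | github.com/pypi-data/pypi-mirror-132 | packages/tusc/tusc-0.0.2.tar.gz/tusc-0.0.2/tusc/posets/utils.py | parse_coverage_list
-- ===== SOURCE A (Python) =====
-- def parse_coverage_list(coverage_list):
--     """
--     Given a coverage_list (structured as a list of coverage statements (which
--     are strings) that define the poset, parses them into a dictionary.
--
--     Parameters
--     ----------
--     coverage_list : `list`
--         list of coverage statements defining a poset, e.g.:
--             ["_<1",
--             "_<2",
--             "_<3",
--             "1<12",
--             "1<13",
--             "2<12",
--             "2<23",
--             "3<13",
--             "3<23",
--             "13<123",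
--             "12<123",
--             "23<123"]
--
--     Returns
--     -------
--     coverage_dict : `dict`
--         keys are items in the poset, other than the maximal element
--         values are items in the poset that cover their respective key
--
--     Example Usage
--     -------------
--     >>> coverage_list = [
--     ...    "_<1",
--     ...    "_<2",
--     ...    "_<3",
--     ...    "1<12",
--     ...    "1<13",
--     ...    "2<12",
--     ...    "2<23",
--     ...    "3<13",
--     ...    "3<23",
--     ...    "13<123",
--     ...    "12<123",
--     ...    "23<123"]
--     >>> parse_coverage_list(coverage_list)
--     {'_': ['1', '2', '3'],
--      '1': ['12', '13'],
--      '2': ['12', '23'],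
--      '3': ['13', '23'],
--      '13': ['123'],
--      '12': ['123'],
--      '23': ['123']}
--     """
--     coverage_dict = {}
--     if "<" not in coverage_list[0]:
--         coverage_dict[coverage_list[0]] = []
--     for i in [j.split("<") for j in coverage_list]:
--         for j in range(len(i)-1):
--             if i[j] not in coverage_dict.keys():
--                 coverage_dict[i[j]] = []
--             coverage_dict[i[j]].append(i[j+1])
--     return coverage_dict
-- ===== SOURCE B (Python) =====
-- def parse_coverage_list(coverage_list):
--     # key order: the seeded bare first element (if any), then sources in first-occurrence order
--     keys = [] if "<" in coverage_list[0] else [coverage_list[0]]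
--     edges = []
--     for statement in coverage_list:
--         parts = statement.split("<")
--         edges.extend(zip(parts, parts[1:]))
--     for source, _ in edges:
--         if source not in keys:
--             keys.append(source)
--     # per-key gather: for each key scan the whole edge list once
--     return {k: [t for s, t in edges if s == k] for k in keys}
-- ===== Notes on version B (the rewrite author's own statement) =====
-- stated objective: alternative
-- what changed: A builds the dict incrementally with a fused nested loop (membership check, seed, append per edge); B never builds a dict incrementally: it computes the ordered key list first and then, per key, gathers that key's targets by a filter over the flat edge list (O(K*E) per-key scans instead of A's single-pass mutation). Pre_ excludes only the empty list, on which both raise IndexError.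
import Mathlib
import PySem

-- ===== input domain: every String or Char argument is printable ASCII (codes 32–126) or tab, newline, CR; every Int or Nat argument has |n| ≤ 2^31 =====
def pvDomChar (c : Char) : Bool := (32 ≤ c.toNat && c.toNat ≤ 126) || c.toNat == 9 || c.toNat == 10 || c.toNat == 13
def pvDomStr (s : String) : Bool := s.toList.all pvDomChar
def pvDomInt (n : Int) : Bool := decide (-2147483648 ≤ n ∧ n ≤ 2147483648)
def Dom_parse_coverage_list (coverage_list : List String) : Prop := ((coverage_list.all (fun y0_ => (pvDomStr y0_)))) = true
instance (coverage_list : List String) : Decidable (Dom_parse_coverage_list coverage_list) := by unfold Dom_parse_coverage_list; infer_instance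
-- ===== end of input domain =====

-- B replaces A's incremental dict building (fused nested loop: membership check, seed,
-- append per edge) by a key-list pass followed by a per-key gather over the flat edge
-- list; alternative decomposition, not faster (O(K*E) scans vs A's single pass).
-- Both raise IndexError on the empty list (coverage_list[0]); Pre_ excludes exactly that.

-- ===== PORT A =====
-- the dict-building step of A's inner loop body (membership check, seed [], append)
def pvAStep (d : PySem.Dict String (List String)) (src tgt : String) :
    PySem.Dict String (List String) :=
  let d := if d.contains src then d else d.insert src []
  d.modify src [] (fun v => v ++ [tgt])

def parse_coverage_list (coverage_list : List String) : List (String × List String) :=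
  match coverage_list with
  | [] => []   -- Python raises IndexError here (coverage_list[0]); excluded by Pre_
  | c0 :: _ =>
    let d0 : PySem.Dict String (List String) :=
      if PySem.Str.isIn "<" c0 then PySem.Dict.empty else PySem.Dict.empty.insert c0 []
    let d := (coverage_list.map (fun j => (PySem.Str.split? j "<").getD [])).foldl
      (fun d i =>
        (List.range (i.length - 1)).foldl
          (fun d j => pvAStep d (i.getD j "") (i.getD (j+1) "")) d) d0
    d.items

-- ===== PORT B =====
def parse_coverage_list_alt (coverage_list : List String) : List (String × List String) :=
  match coverage_list with
  | [] => []   -- Python raises IndexError here (coverage_list[0]); excluded by Pre_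
  | c0 :: _ =>
    let keys0 : List String := if PySem.Str.isIn "<" c0 then [] else [c0]
    let edges := coverage_list.foldl (fun es s =>
        let parts := (PySem.Str.split? s "<").getD []
        es ++ parts.zip parts.tail) []
    let keys := edges.foldl (fun K e => if e.1 ∈ K then K else K ++ [e.1]) keys0
    keys.map (fun k => (k, (edges.filter (fun e => e.1 == k)).map (fun e => e.2)))

-- ===== PRECONDITION & SPEC =====
def Pre_parse_coverage_list (coverage_list : List String) : Prop := coverage_list ≠ []
instance (coverage_list : List String) : Decidable (Pre_parse_coverage_list coverage_list) := by
  unfold Pre_parse_coverage_list; infer_instance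

def pvWitness_parse_coverage_list : List String := ["_<1", "1<2", "x"]

def Spec_parse_coverage_list (coverage_list : List String) (out : List (String × List String)) : Prop := out = parse_coverage_list_alt coverage_list
instance (coverage_list : List String) (out : List (String × List String)) : Decidable (Spec_parse_coverage_list coverage_list out) := by unfold Spec_parse_coverage_list; infer_instance

-- ===== CLAIM (what is proved, stated in full; the proofs are below) =====
def Claim_equal_parse_coverage_list : Prop := ∀ (coverage_list : List String), Dom_parse_coverage_list coverage_list → Pre_parse_coverage_list coverage_list → Spec_parse_coverage_list coverage_list (parse_coverage_list coverage_list)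

-- ===== LEMMAS AND PROOFS =====

-- A's step is a plain dict.modify: the seed-then-append is modify's absent-key case
theorem pvAStep_eq_modify (d : PySem.Dict String (List String)) (s t : String) :
    pvAStep d s t = d.modify s [] (fun v => v ++ [t]) := by
  by_cases h : d.contains s
  · simp [pvAStep, h]
  · have hg : d.getD s [] = ([] : List String) := by
      rw [PySem.Dict.getD_of_not_contains] <;> simpa using h
    simp only [pvAStep, h, Bool.false_eq_true, if_false, PySem.Dict.modify,
      PySem.Dict.getD_insert_self, PySem.Dict.insert_insert_self, hg]

-- the adjacent-pairs zip is the index list A's inner loop runs over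
theorem pvZip_eq (xs : List String) :
    xs.zip xs.tail =
      (List.range (xs.length - 1)).map (fun j => (xs.getD j "", xs.getD (j+1) "")) := by
  apply List.ext_getElem
  · simp [List.length_zip]
  · intro k h1 h2
    simp only [List.length_zip, List.length_tail] at h1
    have hk1 : k + 1 < xs.length := by omega
    simp [List.getElem_zip, List.getElem_tail, List.getD_eq_getElem?_getD,
      List.getElem?_eq_getElem (by omega : k < xs.length),
      List.getElem?_eq_getElem hk1]

-- A's inner index loop is a modify-fold over the zipped edge list of one statement
theorem pvInner_eq (xs : List String) (d : PySem.Dict String (List String)) :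
    (List.range (xs.length - 1)).foldl
        (fun d j => pvAStep d (xs.getD j "") (xs.getD (j+1) "")) d
      = (xs.zip xs.tail).foldl
          (fun d e => d.modify e.1 [] (fun v => v ++ [e.2])) d := by
  rw [pvZip_eq, List.foldl_map]
  apply PySem.List.foldl_congr_mem
  intro d j _
  exact pvAStep_eq_modify d _ _

-- A's fused nested fold is one modify-fold over B's flat edge list
theorem pvEdges_fold (cl : List String) (acc : List (String × String))
    (d : PySem.Dict String (List String)) :
    (cl.map (fun j => (PySem.Str.split? j "<").getD [])).foldl
        (fun d i =>
          (List.range (i.length - 1)).foldl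
            (fun d j => pvAStep d (i.getD j "") (i.getD (j+1) "")) d)
        (acc.foldl (fun d e => d.modify e.1 [] (fun v => v ++ [e.2])) d)
    = ((cl.foldl (fun es s =>
        let parts := (PySem.Str.split? s "<").getD []
        es ++ parts.zip parts.tail) acc).foldl
      (fun d e => d.modify e.1 [] (fun v => v ++ [e.2])) d) := by
  induction cl generalizing acc d with
  | nil => simp
  | cons s rest ih =>
    simp only [List.foldl_cons, List.map_cons]
    rw [← ih, pvInner_eq, ← List.foldl_append]

-- the grouping core: one modify-fold's items are the key list mapped over per-key filters
theorem pvGroup (edges : List (String × String)) (d0 : PySem.Dict String (List String))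
    (keys0 : List String) (hk : d0.keys = keys0) (hnd : keys0.Nodup)
    (hg : ∀ k, d0.getD k [] = []) :
    (edges.foldl (fun d e => d.modify e.1 [] (fun v => v ++ [e.2])) d0).items
      = (edges.foldl (fun K e => if e.1 ∈ K then K else K ++ [e.1]) keys0).map
          (fun k => (k, (edges.filter (fun e => e.1 == k)).map (fun e => e.2))) := by
  have hnd' : (edges.foldl (fun d e => d.modify e.1 [] (fun v => v ++ [e.2])) d0).keys.Nodup :=
    PySem.Dict.nodup_keys_foldl_modify_key edges Prod.fst []
      (fun _ e => fun v => v ++ [e.2]) d0 (hk ▸ hnd)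
  rw [PySem.Dict.items_eq_map_keys _ hnd' []]
  rw [PySem.Dict.keys_foldl_modify_key edges Prod.fst []
      (fun _ e => fun v => v ++ [e.2]) d0, hk]
  have hBkeys : edges.foldl (fun K e => if e.1 ∈ K then K else K ++ [e.1]) keys0
      = PySem.Set.update keys0 (edges.map Prod.fst) := by
    rw [PySem.Set.update_map_eq_foldl_add]
    apply PySem.List.foldl_congr_mem
    intro K e _
    exact (PySem.Set.add_eq_ite K e.1).symm
  rw [hBkeys]
  refine List.map_congr_left fun k _ => ?_
  rw [PySem.Dict.getD_foldl_modify_append, hg k]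
  simp

-- ===== VERDICT (by name: the statement is the Claim_ definition above) =====
theorem parse_coverage_list_spec : Claim_equal_parse_coverage_list := by
  intro cl _ hpre
  unfold Spec_parse_coverage_list parse_coverage_list parse_coverage_list_alt
  match cl with
  | [] => exact absurd rfl hpre
  | c0 :: rest =>
    simp only
    have hfold := pvEdges_fold (c0 :: rest) []
      (if PySem.Str.isIn "<" c0 then PySem.Dict.empty else PySem.Dict.empty.insert c0 [])
    rw [List.foldl_nil] at hfold
    rw [hfold]
    apply pvGroup
    · by_cases hc : PySem.Chars.isIn ['<'] c0.toList <;>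
        simp [hc, PySem.Dict.insert, PySem.Dict.contains_empty, PySem.Dict.keys,
          PySem.Dict.empty]
    · by_cases hc : PySem.Chars.isIn ['<'] c0.toList <;> simp [hc]
    · intro k
      by_cases hc : PySem.Chars.isIn ['<'] c0.toList
      · simp [hc]
      · simp [hc, PySem.Dict.getD_insert, PySem.Dict.getD_empty]
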